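-- pv_equiv track=rewrite | github.com/warren-wupeng/dsna | problems/div.py | divide_core
-- ===== SOURCE A (Python) =====
-- def divide_core(dividend: int, divisor: int):
--     dd = dividend
--     dr = divisor
--     result = 0
--     while dd <= dr:
--         m = 0
--         while dr*2**(m+1) >= dd:
--             m += 1
--         dd -= dr*2**m
--         result += 2**m
--
--     return result
-- ===== SOURCE B (Python) =====
-- def divide_core(dividend: int, divisor: int):
--     if dividend > divisor:
--         return 0
--     dd = dividend
--     result = 0
--     k = 31
--     while k >= 0:
--         chunk = divisor << k
--         if chunk >= dd:
--             dd -= chunk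
--             result += 1 << k
--         k -= 1
--     return result
-- ===== Notes on version B (the rewrite author's own statement) =====
-- stated objective: alternative
-- what changed: Replaces A's nested doubling search (outer subtraction loop that re-finds the largest power by recomputing divisor*2**(m+1) from scratch each round) with a single top-down pass over bit positions 31..0 that tries each shifted divisor once.
import Mathlib
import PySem

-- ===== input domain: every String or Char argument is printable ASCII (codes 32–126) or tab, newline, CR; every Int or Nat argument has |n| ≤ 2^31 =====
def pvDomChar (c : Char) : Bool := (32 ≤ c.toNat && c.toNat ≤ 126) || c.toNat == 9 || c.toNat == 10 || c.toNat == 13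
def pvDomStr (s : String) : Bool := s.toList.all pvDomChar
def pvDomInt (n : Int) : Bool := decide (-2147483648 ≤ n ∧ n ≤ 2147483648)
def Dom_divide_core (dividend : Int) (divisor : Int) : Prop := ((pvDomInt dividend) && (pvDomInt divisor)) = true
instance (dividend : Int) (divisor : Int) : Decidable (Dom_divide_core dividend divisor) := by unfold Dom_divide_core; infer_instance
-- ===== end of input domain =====

-- B replaces A's nested doubling search by one fixed top-down pass over bit positions 31..0
-- (alternative algorithm); equivalence is proved on the inputs where A terminates.

-- ===== PORT A =====
-- inner 'while dr*2**(m+1) >= dd: m += 1' loop; fuel only makes the recursion total,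
-- under Pre_ the supplied fuel is proved sufficient (aInner_sound).
def aInner (dd dr : Int) : Nat → Nat → Nat
  | 0, m => m
  | fuel + 1, m => if dd ≤ dr * 2 ^ (m + 1) then aInner dd dr fuel (m + 1) else m

-- outer 'while dd <= dr' loop; fuel only makes the recursion total (sufficient under Pre_).
def aOuter (dr : Int) : Nat → Int → Int → Int
  | 0, _, result => result
  | fuel + 1, dd, result =>
    if dd ≤ dr then
      let m := aInner dd dr (dd.natAbs + 1) 0
      aOuter dr fuel (dd - dr * 2 ^ m) (result + 2 ^ m)
    else result

def divide_core (dividend : Int) (divisor : Int) : Int :=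
  aOuter divisor (dividend.natAbs + 1) dividend 0

-- ===== PORT B =====
-- 'while k >= 0' countdown over bit positions; bLoop n processes positions n-1, …, 0.
def bLoop (dr : Int) : Nat → Int → Int → Int
  | 0, _, result => result
  | n + 1, dd, result =>
    let chunk := dr * 2 ^ n
    if dd ≤ chunk then bLoop dr n (dd - chunk) (result + 2 ^ n)
    else bLoop dr n dd result

def divide_core_alt (dividend : Int) (divisor : Int) : Int :=
  if divisor < dividend then 0
  else bLoop divisor 32 dividend 0

-- ===== PRECONDITION & SPEC =====
-- Pre_ excludes exactly the inputs where the Python A never returns (its loops diverge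
-- when dividend ≤ divisor and divisor ≥ 0); A returns on every input satisfying Pre_.
def Pre_divide_core (dividend : Int) (divisor : Int) : Prop :=
  divisor < 0 ∨ divisor < dividend
instance (dividend : Int) (divisor : Int) : Decidable (Pre_divide_core dividend divisor) := by
  unfold Pre_divide_core; infer_instance

def pvWitness_divide_core : Int × Int := (-10, -3)

def Spec_divide_core (dividend : Int) (divisor : Int) (out : Int) : Prop := out = divide_core_alt dividend divisor
instance (dividend : Int) (divisor : Int) (out : Int) : Decidable (Spec_divide_core dividend divisor out) := by unfold Spec_divide_core; infer_instance

-- ===== CLAIM (what is proved, stated in full; the proofs are below) =====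
def Claim_equal_divide_core : Prop := ∀ (dividend : Int) (divisor : Int), Dom_divide_core dividend divisor → Pre_divide_core dividend divisor → Spec_divide_core dividend divisor (divide_core dividend divisor)

-- ===== LEMMAS AND PROOFS =====

-- quotient in (divisor, 0] is zero
theorem pv_ediv_zero (dd dr : Int) (h1 : dr < dd) (h2 : dd ≤ 0) :
    (-dd) / (-dr) = 0 :=
  Int.ediv_eq_zero_of_lt (by omega) (by omega)

-- peel one chunk dr*2^k off dd
theorem pv_ediv_step (dd dr : Int) (k : Nat) (hdr : dr ≤ -1) :
    (-dd) / (-dr) = (-(dd - dr * 2 ^ k)) / (-dr) + 2 ^ k := by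
  have h : (-dd) = (-(dd - dr * 2 ^ k)) + (2 ^ k) * (-dr) := by ring
  rw [h, Int.add_mul_ediv_right _ _ (by omega : (-dr) ≠ 0)]

-- the inner loop, given enough fuel, returns M with dd ≤ dr*2^M and dr*2^(M+1) < dd
theorem aInner_sound (dd dr : Int) (hdr : dr ≤ -1) (hdd : dd ≤ -1) :
    ∀ (fuel m : Nat), dd ≤ dr * 2 ^ m → dd.natAbs ≤ m + fuel →
      dd ≤ dr * 2 ^ (aInner dd dr fuel m) ∧ dr * 2 ^ (aInner dd dr fuel m + 1) < dd := by
  intro fuel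
  induction fuel with
  | zero =>
    intro m hm hfuel
    refine ⟨hm, ?_⟩
    have h1 : (m : Int) + 1 < 2 ^ (m + 1) := by exact_mod_cast Nat.lt_two_pow_self
    have h2 : dr * 2 ^ (m + 1) ≤ -(2 ^ (m + 1)) := by
      have hp : (0:Int) < 2 ^ (m + 1) := by positivity
      nlinarith
    have h3 : (dd.natAbs : Int) = -dd := by omega
    simp only [aInner]
    omega
  | succ f ih =>
    intro m hm hfuel
    simp only [aInner]
    by_cases h : dd ≤ dr * 2 ^ (m + 1)
    · simp only [if_pos h]
      exact ih (m + 1) h (by omega)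
    · simp only [if_neg h]
      exact ⟨hm, by omega⟩

-- the outer loop computes the quotient, given enough fuel
theorem aOuter_sound (dr : Int) (hdr : dr ≤ -1) :
    ∀ (fuel : Nat) (dd result : Int), dd ≤ 0 → -dd + 1 ≤ (fuel : Int) →
      aOuter dr fuel dd result = result + (-dd) / (-dr) := by
  intro fuel
  induction fuel with
  | zero => intro dd result hdd hfuel; simp at hfuel; omega
  | succ f ih =>
    intro dd result hdd hfuel
    simp only [aOuter]
    by_cases h : dd ≤ dr
    · simp only [if_pos h]
      have hdd1 : dd ≤ -1 := by omega
      obtain ⟨h1, h2⟩ :=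
        aInner_sound dd dr hdr hdd1 (dd.natAbs + 1) 0 (by simpa using h) (by omega)
      set M := aInner dd dr (dd.natAbs + 1) 0 with hM
      have hpow : (1:Int) ≤ 2 ^ M := one_le_pow₀ (by omega)
      have hchunk : dr * 2 ^ M ≤ -1 := by nlinarith
      have := ih (dd - dr * 2 ^ M) (result + 2 ^ M) (by omega) (by omega)
      rw [this, pv_ediv_step dd dr M hdr]
      ring
    · simp only [if_neg h]
      rw [pv_ediv_zero dd dr (by omega) hdd]
      ring

-- B's countdown loop computes the quotient under the invariant dr*2^n < dd ≤ 0
theorem bLoop_sound (dr : Int) (hdr : dr ≤ -1) :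
    ∀ (n : Nat) (dd result : Int), dd ≤ 0 → dr * 2 ^ n < dd →
      bLoop dr n dd result = result + (-dd) / (-dr) := by
  intro n
  induction n with
  | zero =>
    intro dd result hdd hinv
    simp only [pow_zero, mul_one] at hinv
    simp only [bLoop]
    rw [pv_ediv_zero dd dr hinv hdd]
    ring
  | succ n ih =>
    intro dd result hdd hinv
    simp only [bLoop]
    by_cases h : dd ≤ dr * 2 ^ n
    · simp only [if_pos h]
      have hnext : dr * 2 ^ n < dd - dr * 2 ^ n := by
        have : dr * 2 ^ (n + 1) = dr * 2 ^ n + dr * 2 ^ n := by ring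
        omega
      rw [ih (dd - dr * 2 ^ n) (result + 2 ^ n) (by omega) hnext,
        pv_ediv_step dd dr n hdr]
      ring
    · simp only [if_neg h]
      exact ih dd result hdd (by omega)

-- ===== VERDICT (by name: the statement is the Claim_ definition above) =====
theorem divide_core_spec : Claim_equal_divide_core := by
  intro dividend divisor hdom hpre
  unfold Spec_divide_core divide_core divide_core_alt
  by_cases h : divisor < dividend
  · -- outer loop never entered on either side
    rw [if_pos h]
    simp only [aOuter, if_neg (by omega : ¬ dividend ≤ divisor)]
  · rw [if_neg h]
    have hle : dividend ≤ divisor := by omega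
    have hdr : divisor ≤ -1 := by
      rcases hpre with hp | hp
      · omega
      · omega
    have hdom' : -2147483648 ≤ dividend := by
      unfold Dom_divide_core pvDomInt at hdom
      simp only [Bool.and_eq_true, decide_eq_true_eq] at hdom
      exact hdom.1.1
    have hdd0 : dividend ≤ 0 := by omega
    rw [aOuter_sound divisor hdr (dividend.natAbs + 1) dividend 0 hdd0 (by omega)]
    rw [bLoop_sound divisor hdr 32 dividend 0 hdd0 (by nlinarith [pow_pos (by norm_num : (0:Int) < 2) 32])]
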